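-- pv_equiv track=rewrite | github.com/morganpothoff/GroceryGuru | Source/GroceryGuru.py | _recipe_ingredient_in_pantry
-- ===== SOURCE A (Python) =====
-- def _recipe_ingredient_in_pantry(ingredient_line: str, pantry_names: set) -> bool:
-- 	"""Check if a recipe ingredient line matches any pantry ingredient."""
-- 	line_lower = (ingredient_line or "").strip().lower()
-- 	if not line_lower:
-- 		return False
-- 	for name in pantry_names:
-- 		if len(name) >= 2 and name in line_lower:
-- 			return True
-- 	return False
-- ===== SOURCE B (Python) =====
-- def _recipe_ingredient_in_pantry(ingredient_line: str, pantry_names: set) -> bool: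
-- 	"""Check if a recipe ingredient line matches any pantry ingredient."""
-- 	line_lower = (ingredient_line or "").strip().lower()
-- 	if not line_lower:
-- 		return False
-- 	n = len(line_lower)
-- 	for start in range(n):
-- 		for end in range(start + 2, n + 1):
-- 			if line_lower[start:end] in pantry_names:
-- 				return True
-- 	return False
-- ===== Notes on version B (the rewrite author's own statement) =====
-- stated objective: alternative
-- what changed: B inverts the scan: instead of testing each pantry name for substring containment in the line, it enumerates every window of the lowercased line of length >= 2 and tests membership of that window in the pantry set.
import Mathlib
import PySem

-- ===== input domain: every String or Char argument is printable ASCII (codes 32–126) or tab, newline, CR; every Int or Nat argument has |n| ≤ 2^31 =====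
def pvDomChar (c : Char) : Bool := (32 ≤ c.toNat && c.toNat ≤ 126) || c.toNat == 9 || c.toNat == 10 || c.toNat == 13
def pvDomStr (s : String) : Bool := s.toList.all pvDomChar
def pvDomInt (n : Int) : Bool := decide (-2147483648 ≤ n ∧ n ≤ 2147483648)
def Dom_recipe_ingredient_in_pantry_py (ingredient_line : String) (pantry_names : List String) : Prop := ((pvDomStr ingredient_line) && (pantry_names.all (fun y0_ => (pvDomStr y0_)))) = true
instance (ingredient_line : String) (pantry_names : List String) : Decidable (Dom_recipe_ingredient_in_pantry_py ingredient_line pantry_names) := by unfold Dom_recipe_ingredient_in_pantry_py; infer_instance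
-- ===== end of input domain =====

-- B replaces the scan over pantry names by a scan over all windows of the line of length ≥ 2,
-- using the pantry set as a membership table (alternative decomposition; same result proved equal).


-- ===== PORT A =====
def recipe_ingredient_in_pantry_py (ingredient_line : String) (pantry_names : List String) : Bool :=
  -- line_lower = (ingredient_line or "").strip().lower()
  let line_lower := PySem.Str.lower (PySem.Str.strip (if ingredient_line = "" then "" else ingredient_line))
  if line_lower = "" then false
  else
    -- for name in pantry_names: if len(name) >= 2 and name in line_lower: return True
    pantry_names.any (fun name =>
      decide (2 ≤ PySem.Str.len name) && PySem.Str.isIn name line_lower)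

-- ===== PORT B =====
def recipe_ingredient_in_pantry_py_alt (ingredient_line : String) (pantry_names : List String) : Bool :=
  let line_lower := PySem.Str.lower (PySem.Str.strip (if ingredient_line = "" then "" else ingredient_line))
  if line_lower = "" then false
  else
    let n := PySem.Str.len line_lower
    -- for start in range(n): for end in range(start+2, n+1): if line_lower[start:end] in pantry_names: return True
    (PySem.List.pyRange 0 n 1).any (fun start =>
      (PySem.List.pyRange (start + 2) (n + 1) 1).any (fun stop =>
        pantry_names.contains (PySem.Str.slice line_lower (some start) (some stop))))

-- ===== PRECONDITION & SPEC =====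
def Spec_recipe_ingredient_in_pantry_py (ingredient_line : String) (pantry_names : List String) (out : Bool) : Prop := out = recipe_ingredient_in_pantry_py_alt ingredient_line pantry_names
instance (ingredient_line : String) (pantry_names : List String) (out : Bool) : Decidable (Spec_recipe_ingredient_in_pantry_py ingredient_line pantry_names out) := by unfold Spec_recipe_ingredient_in_pantry_py; infer_instance

-- ===== CLAIM (what is proved, stated in full; the proofs are below) =====
def Claim_equal_recipe_ingredient_in_pantry_py : Prop := ∀ (ingredient_line : String) (pantry_names : List String), Dom_recipe_ingredient_in_pantry_py ingredient_line pantry_names → Spec_recipe_ingredient_in_pantry_py ingredient_line pantry_names (recipe_ingredient_in_pantry_py ingredient_line pantry_names)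

-- ===== LEMMAS AND PROOFS =====

-- A's scan (some pantry name of length ≥ 2 occurs in L) equals B's scan
-- (some window of L of length ≥ 2 is a pantry name).
lemma pantry_scan_eq_window_scan (L : String) (P : List String) :
    (P.any (fun name => decide (2 ≤ PySem.Str.len name) && PySem.Str.isIn name L))
    = ((PySem.List.pyRange 0 (PySem.Str.len L) 1).any (fun start =>
        (PySem.List.pyRange (start + 2) (PySem.Str.len L + 1) 1).any (fun stop =>
          P.contains (PySem.Str.slice L (some start) (some stop))))) := by
  rw [Bool.eq_iff_iff]
  simp only [List.any_eq_true, Bool.and_eq_true, decide_eq_true_eq,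
    PySem.Str.isIn_iff_infix, PySem.List.mem_pyRange_one, List.contains_iff_mem,
    PySem.Str.len_eq]
  constructor
  · rintro ⟨name, hmem, hlen, s, t, hst⟩
    have hlen' : 2 ≤ name.toList.length := by exact_mod_cast hlen
    have hL : L.toList.length = s.length + name.toList.length + t.length := by
      rw [← hst]; simp; omega
    refine ⟨(s.length : Int), ⟨by positivity, by omega⟩,
      ((s.length : Int) + (name.toList.length : Int)), ⟨by omega, by omega⟩,
      ?_⟩
    have htl : (PySem.Str.slice L (some (s.length : Int))
        (some ((s.length : Int) + (name.toList.length : Int)))).toList = name.toList := by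
      rw [PySem.Str.toList_slice, PySem.Chars.slice_eq_listSlice, ← hst,
        PySem.List.slice_natCast_add, List.append_assoc, List.drop_left, List.take_left]
    have : PySem.Str.slice L (some (s.length : Int))
        (some ((s.length : Int) + (name.toList.length : Int))) = name :=
      String.toList_injective htl
    rwa [this]
  · rintro ⟨start, ⟨h0, h1⟩, stop, ⟨h2, h3⟩, hmem⟩
    have h0' : (0 : Int) ≤ stop := by omega
    refine ⟨_, hmem, ?_, ?_⟩
    · -- 2 ≤ len of the window
      rw [PySem.Str.toList_slice, PySem.Chars.slice_eq_listSlice, PySem.List.slice_toNat (ha := h0) (hb := h0')]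
      have := Int.toNat_of_nonneg h0
      have := Int.toNat_of_nonneg h0'
      have hb : stop.toNat ≤ L.toList.length := by omega
      simp only [List.length_take, List.length_drop]
      push_cast
      omega
    · -- the window is an infix of L
      rw [PySem.Str.toList_slice, PySem.Chars.slice_eq_listSlice, PySem.List.slice_toNat (ha := h0) (hb := h0')]
      exact ⟨L.toList.take start.toNat, (L.toList.drop start.toNat).drop (stop.toNat - start.toNat),
        by rw [List.append_assoc, List.take_append_drop, List.take_append_drop]⟩

-- ===== VERDICT (by name: the statement is the Claim_ definition above) =====
theorem recipe_ingredient_in_pantry_py_spec : Claim_equal_recipe_ingredient_in_pantry_py := by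
  intro line P _
  unfold Spec_recipe_ingredient_in_pantry_py recipe_ingredient_in_pantry_py recipe_ingredient_in_pantry_py_alt
  dsimp only
  by_cases h : PySem.Str.lower (PySem.Str.strip (if line = "" then "" else line)) = ""
  · rw [if_pos h, if_pos h]
  · rw [if_neg h, if_neg h]
    exact pantry_scan_eq_window_scan _ P
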